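-- pv_equiv track=rewrite | github.com/study-Algoringo/swjungle_PS | minseok/[PGS]귤고르기_138476.py | solution
-- ===== SOURCE A (Python) =====
-- from collections import Counter
--
-- def solution(k, tangerine):
--     answer = 0
--     box = Counter(tangerine).most_common()
--
--     for i in range(len(box)):
--         k -= box[i][1]
--         answer += 1
--         if k <= 0:
--             break
--
--     return answer
-- ===== SOURCE B (Python) =====
-- from collections import Counter
--
-- def solution(k, tangerine):
--     # Counting-sort over frequency buckets instead of sorting most_common.
--     counts = Counter(tangerine)
--     bucket = Counter(counts.values())
--     answer = 0
--     for f in range(max(counts.values(), default=0), 0, -1):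
--         for _ in range(bucket[f]):
--             k -= f
--             answer += 1
--             if k <= 0:
--                 return answer
--     return answer
-- ===== Notes on version B (the rewrite author's own statement) =====
-- stated objective: alternative
-- what changed: B replaces Counter.most_common's comparison sort with a frequency-of-frequencies bucket table consumed from the highest frequency downward (a counting-sort), removing the sort entirely.
import Mathlib
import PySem

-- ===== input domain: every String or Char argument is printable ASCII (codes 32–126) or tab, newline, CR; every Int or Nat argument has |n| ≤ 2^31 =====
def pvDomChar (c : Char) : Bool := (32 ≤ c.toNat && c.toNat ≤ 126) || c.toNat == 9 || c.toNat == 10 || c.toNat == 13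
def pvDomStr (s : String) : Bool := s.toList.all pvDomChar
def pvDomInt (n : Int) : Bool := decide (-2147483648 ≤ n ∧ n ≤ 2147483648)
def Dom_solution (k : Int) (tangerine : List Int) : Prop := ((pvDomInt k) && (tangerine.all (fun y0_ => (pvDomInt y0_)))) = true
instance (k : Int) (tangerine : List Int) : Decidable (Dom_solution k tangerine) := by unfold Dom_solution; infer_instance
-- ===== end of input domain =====

-- B replaces A's sort of Counter.most_common by a counting-sort over frequency-of-frequency
-- buckets consumed from the highest frequency down (objective: alternative algorithm).

-- ===== PORT A =====
-- the 'for i in range(len(box)): k -= box[i][1]; answer += 1; if k <= 0: break' loop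
def solLoopA : List (Int × Int) → Int → Int → Int
  | [], _, answer => answer
  | p :: rest, k, answer =>
      if k - p.2 ≤ 0 then answer + 1 else solLoopA rest (k - p.2) (answer + 1)

def solution (k : Int) (tangerine : List Int) : Int :=
  -- Counter(tangerine).most_common() = sorted(items, key=itemgetter(1), reverse=True)
  let box := PySem.List.sorted (PySem.Dict.counter tangerine).items (fun p => p.2) true
  solLoopA box k 0

-- ===== PORT B =====
-- inner 'for _ in range(bucket[f])' loop: Sum.inr = early 'return answer', Sum.inl = loop ends
def solInnerB (f : Int) : Nat → Int → Int → (Int × Int) ⊕ Int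
  | 0, k, answer => Sum.inl (k, answer)
  | n + 1, k, answer =>
      if k - f ≤ 0 then Sum.inr (answer + 1) else solInnerB f n (k - f) (answer + 1)

-- outer 'for f in range(maxc, 0, -1)' loop, fuel = current f
def solOuterB (bucket : PySem.Dict Int Int) : Nat → Int → Int → Int
  | 0, _, answer => answer
  | f + 1, k, answer =>
      match solInnerB ((f : Int) + 1) (bucket.getD ((f : Int) + 1) 0).toNat k answer with
      | Sum.inr a => a
      | Sum.inl (k', a') => solOuterB bucket f k' a'

def solution_alt (k : Int) (tangerine : List Int) : Int :=
  let counts := PySem.Dict.counter tangerine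
  let bucket := PySem.Dict.counter counts.values
  solOuterB bucket (PySem.List.maxD counts.values (fun x => x) 0).toNat k 0

-- ===== PRECONDITION & SPEC =====
def Spec_solution (k : Int) (tangerine : List Int) (out : Int) : Prop := out = solution_alt k tangerine
instance (k : Int) (tangerine : List Int) (out : Int) : Decidable (Spec_solution k tangerine out) := by unfold Spec_solution; infer_instance

-- ===== CLAIM (what is proved, stated in full; the proofs are below) =====
def Claim_equal_solution : Prop := ∀ (k : Int) (tangerine : List Int), Dom_solution k tangerine → Spec_solution k tangerine (solution k tangerine)

-- ===== LEMMAS AND PROOFS =====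

-- the common core: the greedy loop over the descending list of frequencies
def solRun : List Int → Int → Int → Int
  | [], _, a => a
  | c :: cs, k, a => if k - c ≤ 0 then a + 1 else solRun cs (k - c) (a + 1)

-- the sequence of frequencies B's two loops traverse: f, f-1, …, 1, each repeated bucket[f] times
def solExpand (bucket : PySem.Dict Int Int) : Nat → List Int
  | 0 => []
  | f + 1 => List.replicate (bucket.getD ((f : Int) + 1) 0).toNat ((f : Int) + 1) ++ solExpand bucket f

theorem solLoopA_eq_run (l : List (Int × Int)) (k a : Int) :
    solLoopA l k a = solRun (l.map (·.2)) k a := by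
  induction l generalizing k a with
  | nil => rfl
  | cons p rest ih => simp [solLoopA, solRun, ih]

theorem solInnerB_run (f : Int) (n : Nat) (rest : List Int) (k a : Int) :
    solRun (List.replicate n f ++ rest) k a =
      match solInnerB f n k a with
      | Sum.inl (k', a') => solRun rest k' a'
      | Sum.inr r => r := by
  induction n generalizing k a with
  | zero => rfl
  | succ m ih =>
      simp only [List.replicate_succ, List.cons_append, solRun, solInnerB]
      split_ifs with h
      · rfl
      · exact ih _ _

theorem solOuterB_eq_run (bucket : PySem.Dict Int Int) (f : Nat) (k a : Int) :
    solOuterB bucket f k a = solRun (solExpand bucket f) k a := by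
  induction f generalizing k a with
  | zero => rfl
  | succ m ih =>
      rw [solOuterB, solExpand, solInnerB_run]
      cases h : solInnerB ((m : Int) + 1) ((bucket.getD ((m : Int) + 1) 0).toNat) k a with
      | inl p => exact ih p.1 p.2
      | inr r => rfl

theorem count_solExpand (vals : List Int) (f : Nat) (v : Int) :
    (solExpand (PySem.Dict.counter vals) f).count v =
      if 0 < v ∧ v ≤ (f : Int) then vals.count v else 0 := by
  induction f with
  | zero =>
      simp only [solExpand, List.count_nil]
      split_ifs with h
      · omega
      · rfl
  | succ m ih =>
      simp only [solExpand, List.count_append, List.count_replicate, ih,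
        PySem.Dict.getD_counter, beq_iff_eq]
      by_cases hv : (m : Int) + 1 = v
      · have h2 : 0 < v ∧ v ≤ ((m + 1 : Nat) : Int) := by omega
        rw [if_pos hv, if_neg (by omega), if_pos h2]
        subst hv
        simp
      · rw [if_neg hv]
        by_cases h1 : 0 < v ∧ v ≤ (m : Int)
        · rw [if_pos h1, if_pos (by omega)]; simp
        · rw [if_neg h1, if_neg (by omega)]

theorem mem_solExpand_bounds (bucket : PySem.Dict Int Int) (f : Nat) (v : Int)
    (h : v ∈ solExpand bucket f) : 0 < v ∧ v ≤ (f : Int) := by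
  induction f with
  | zero => simp [solExpand] at h
  | succ m ih =>
      simp only [solExpand, List.mem_append, List.mem_replicate] at h
      rcases h with ⟨-, h⟩ | h
      · subst h; constructor <;> omega
      · have := ih h; push_cast; omega

theorem pairwise_solExpand (bucket : PySem.Dict Int Int) (f : Nat) :
    (solExpand bucket f).Pairwise (fun a b => b ≤ a) := by
  induction f with
  | zero => exact List.Pairwise.nil
  | succ m ih =>
      rw [solExpand, List.pairwise_append]
      refine ⟨List.pairwise_replicate.mpr (Or.inr le_rfl), ih, ?_⟩
      intro x hx y hy
      have hx' := (List.mem_replicate.mp hx).2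
      have hy' := mem_solExpand_bounds bucket m y hy
      subst hx'; omega

-- every value of Counter(t) is a positive count
theorem counter_values_pos (t : List Int) (v : Int)
    (hv : v ∈ (PySem.Dict.counter t).values) : 1 ≤ v := by
  have : (PySem.Dict.counter t).values
      = (PySem.Set.ofList t).map (fun x => ((t.count x : Nat) : Int)) := by
    show ((PySem.Dict.counter t).items).map (·.2) = _
    rw [PySem.Dict.items_counter]; simp
  rw [this] at hv
  rcases List.mem_map.mp hv with ⟨x, hx, rfl⟩
  have hx' : x ∈ t := (PySem.Set.mem_ofList t x).mp hx
  have : 0 < t.count x := List.count_pos_iff.mpr hx'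
  omega

-- every value is ≤ max(values, default=0)
theorem counter_values_le_max (vals : List Int) (v : Int) (hv : v ∈ vals) :
    v ≤ PySem.List.maxD vals (fun x => x) 0 := by
  unfold PySem.List.maxD
  cases h : PySem.List.max? vals (fun x => x) with
  | none =>
      rw [PySem.List.max?_eq_none_iff] at h
      subst h; simp at hv
  | some m =>
      simpa using PySem.List.max?_isMax h v hv

-- the crux: A's descending most_common frequencies = B's bucket expansion
theorem lists_eq (t : List Int) :
    ((PySem.List.sorted (PySem.Dict.counter t).items (fun p => p.2) true).map (·.2))
      = solExpand (PySem.Dict.counter (PySem.Dict.counter t).values)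
          (PySem.List.maxD (PySem.Dict.counter t).values (fun x => x) 0).toNat := by
  set vals := (PySem.Dict.counter t).values with hvals
  set maxc := PySem.List.maxD vals (fun x => x) 0 with hmaxc
  have hmax_le : ∀ v ∈ vals, v ≤ (maxc.toNat : Int) := by
    intro v hv
    have h1 := counter_values_le_max vals v hv
    have h2 := counter_values_pos t v (hvals ▸ hv)
    omega
  -- Perm to each other (both count-equal to vals)
  have hpermA : ((PySem.List.sorted (PySem.Dict.counter t).items (fun p => p.2) true).map (·.2)).Perm vals := by
    show _root_.List.Perm _ ((PySem.Dict.counter t).items.map (fun p : Int × Int => p.2))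
    exact (PySem.List.sorted_perm (PySem.Dict.counter t).items (fun p : Int × Int => p.2) true).map
      (fun p : Int × Int => p.2)
  have hperm : ((PySem.List.sorted (PySem.Dict.counter t).items (fun p => p.2) true).map (·.2)).Perm
      (solExpand (PySem.Dict.counter vals) maxc.toNat) := by
    rw [List.perm_iff_count]
    intro v
    rw [hpermA.count_eq, count_solExpand]
    split_ifs with h
    · rfl
    · by_cases hv : v ∈ vals
      · exact absurd ⟨by have := counter_values_pos t v (hvals ▸ hv); omega, hmax_le v hv⟩ h
      · simp [List.count_eq_zero.mpr hv]
  -- both are sorted descending; a descending permutation is unique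
  refine List.Perm.eq_of_pairwise (le := fun a b => b ≤ a) (fun a b _ _ h1 h2 => le_antisymm h2 h1) ?_ ?_ hperm
  · have := PySem.List.sorted_pairwise_rev (PySem.Dict.counter t).items (fun p => p.2)
    exact (List.pairwise_map).mpr this
  · exact pairwise_solExpand _ _

-- ===== VERDICT (by name: the statement is the Claim_ definition above) =====
theorem solution_spec : Claim_equal_solution := by
  intro k t _
  show solution k t = solution_alt k t
  unfold solution solution_alt
  rw [solLoopA_eq_run, solOuterB_eq_run, lists_eq]
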